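-- pv_equiv track=rewrite | github.com/parsiad/mumpy | src/mumpy/_core.py | _prepare_split_indices
-- ===== SOURCE A (Python) =====
-- import builtins
--
-- def _prepare_split_indices(length: int, sections: int) -> list[int]:
--     if sections <= 0:
--         msg = "number of sections must be >= 1"
--         raise ValueError(msg)
--     q, r = builtins.divmod(length, sections)
--     indices: list[int] = []
--     running = 0
--     for i in range(sections - 1):
--         running += q + (1 if i < r else 0)
--         indices.append(running)
--     return indices
-- ===== SOURCE B (Python) =====
-- def _prepare_split_indices(length: int, sections: int) -> list[int]:
--     if sections <= 0:
--         msg = "number of sections must be >= 1"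
--         raise ValueError(msg)
--     q, r = divmod(length, sections)
--     return [i * q + min(i, r) for i in range(1, sections)]
-- ===== Notes on version B (the rewrite author's own statement) =====
-- stated objective: simpler
-- what changed: Replaces the running-total accumulator loop (running += q + (1 if i < r else 0)) by the closed form i*q + min(i, r) computed independently for each boundary position i.
import Mathlib
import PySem

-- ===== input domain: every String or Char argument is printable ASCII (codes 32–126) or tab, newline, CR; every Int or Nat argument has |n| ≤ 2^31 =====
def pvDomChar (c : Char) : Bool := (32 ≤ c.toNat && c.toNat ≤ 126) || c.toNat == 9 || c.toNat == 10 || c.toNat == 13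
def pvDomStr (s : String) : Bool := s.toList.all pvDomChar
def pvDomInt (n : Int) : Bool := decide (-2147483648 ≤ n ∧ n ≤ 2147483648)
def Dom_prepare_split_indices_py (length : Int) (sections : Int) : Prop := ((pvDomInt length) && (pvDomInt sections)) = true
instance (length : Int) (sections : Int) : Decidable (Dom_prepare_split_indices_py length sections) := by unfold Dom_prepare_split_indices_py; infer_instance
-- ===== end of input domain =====

-- B replaces A's running-total accumulator by the closed form i*q + min(i, r) per boundary (simpler decomposition).

-- ===== PORT A =====
-- A raises ValueError when sections ≤ 0; that case is outside Pre_ and the port returns [] there.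
def prepare_split_indices_py (length : Int) (sections : Int) : List Int :=
  if sections ≤ 0 then []
  else
    let q := PySem.Int.floordiv length sections
    let r := PySem.Int.mod length sections
    let st := (PySem.List.pyRange 0 (sections - 1) 1).foldl
      (fun (st : Int × List Int) i =>
        let running := st.1 + (q + (if i < r then 1 else 0))
        (running, st.2 ++ [running]))
      (0, ([] : List Int))
    st.2

-- ===== PORT B =====
-- B also raises ValueError when sections ≤ 0 (outside Pre_); the port returns [] there.
def prepare_split_indices_py_alt (length : Int) (sections : Int) : List Int :=
  if sections ≤ 0 then []
  else
    let q := PySem.Int.floordiv length sections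
    let r := PySem.Int.mod length sections
    (PySem.List.pyRange 1 sections 1).map (fun i => i * q + min i r)

-- ===== PRECONDITION & SPEC =====
-- Pre_ excludes exactly sections ≤ 0, where the Python A raises ValueError.
def Pre_prepare_split_indices_py (length : Int) (sections : Int) : Prop := 1 ≤ sections
instance (length : Int) (sections : Int) : Decidable (Pre_prepare_split_indices_py length sections) := by unfold Pre_prepare_split_indices_py; infer_instance
def pvWitness_prepare_split_indices_py : Int × Int := (10, 3)

def Spec_prepare_split_indices_py (length : Int) (sections : Int) (out : List Int) : Prop := out = prepare_split_indices_py_alt length sections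
instance (length : Int) (sections : Int) (out : List Int) : Decidable (Spec_prepare_split_indices_py length sections out) := by unfold Spec_prepare_split_indices_py; infer_instance

-- ===== CLAIM (what is proved, stated in full; the proofs are below) =====
def Claim_equal_prepare_split_indices_py : Prop := ∀ (length : Int) (sections : Int), Dom_prepare_split_indices_py length sections → Pre_prepare_split_indices_py length sections → Spec_prepare_split_indices_py length sections (prepare_split_indices_py length sections)

-- ===== LEMMAS AND PROOFS =====

-- Invariant: after folding range(0, n), running = n*q + min(n, r) and the list holds the boundaries 1..n.
theorem pv_fold_invariant (q r : Int) (hr : 0 ≤ r) (n : Nat) :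
    (PySem.List.pyRange 0 (n : Int) 1).foldl
      (fun (st : Int × List Int) i =>
        let running := st.1 + (q + (if i < r then 1 else 0))
        (running, st.2 ++ [running]))
      (0, ([] : List Int))
    = ((n : Int) * q + min (n : Int) r,
       (PySem.List.pyRange 1 ((n : Int) + 1) 1).map (fun i => i * q + min i r)) := by
  induction n with
  | zero =>
      simp [PySem.List.pyRange_one_eq_nil]
      omega
  | succ m ih =>
      have h1 : ((m + 1 : Nat) : Int) = (m : Int) + 1 := by push_cast; ring
      rw [h1, PySem.List.pyRange_one_succ_right (a := 0) (b := (m : Int)) (Int.natCast_nonneg m),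
          List.foldl_append, ih]
      have h2 : (PySem.List.pyRange 1 ((m : Int) + 1 + 1) 1)
          = PySem.List.pyRange 1 ((m : Int) + 1) 1 ++ [(m : Int) + 1] := by
        exact PySem.List.pyRange_one_succ_right (a := 1) (b := (m : Int) + 1) (by omega)
      rw [h2]
      simp only [List.foldl_cons, List.foldl_nil, List.map_append, List.map_cons, List.map_nil]
      have hkey : (m : Int) * q + min (m : Int) r + (q + if (m : Int) < r then 1 else 0)
          = ((m : Int) + 1) * q + min ((m : Int) + 1) r := by
        by_cases h : (m : Int) < r
        · rw [if_pos h, min_eq_left (by omega), min_eq_left (by omega)]; ring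
        · rw [if_neg h, min_eq_right (by omega), min_eq_right (by omega)]; ring
      rw [hkey]

-- ===== VERDICT (by name: the statement is the Claim_ definition above) =====
theorem prepare_split_indices_py_spec : Claim_equal_prepare_split_indices_py := by
  intro length sections _ hpre
  unfold Pre_prepare_split_indices_py at hpre
  unfold Spec_prepare_split_indices_py prepare_split_indices_py prepare_split_indices_py_alt
  have hs : ¬ sections ≤ 0 := by exact not_le.mpr (by omega)
  simp only [hs, if_false]
  have hr : 0 ≤ PySem.Int.mod length sections := by
    rw [PySem.Int.mod_eq_emod_of_pos (by omega)]
    exact Int.emod_nonneg length (by omega)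
  have hn : sections - 1 = ((sections - 1).toNat : Int) := by omega
  rw [hn, pv_fold_invariant _ _ hr]
  have hb : ((sections - 1).toNat : Int) + 1 = sections := by omega
  rw [hb]
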